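-- pv_equiv track=rewrite | github.com/Gutiotomas/Analysis-Design-Algorithms | Module_10_Divide_Conquer_1/Problem_D/scoring_programming_marathons.py | marathon
-- ===== SOURCE A (Python) =====
-- def divide_teams(tms):
--     if len(tms) <= 1:
--         return tms
--
--     md = len(tms) // 2
--     lft = divide_teams(tms[:md])
--     rgt = divide_teams(tms[md:])
--
--     return merge(lft, rgt)
--
-- def merge(lft, rgt):
--     rslt = []
--     i, j = 0, 0
--     while i < len(lft) and j < len(rgt):
--         if (lft[i][1] > rgt[j][1]) or (lft[i][1] == rgt[j][1] and lft[i][2] < rgt[j][2]) or (lft[i][1] == rgt[j][1] and lft[i][2] == rgt[j][2] and lft[i][0] < rgt[j][0]):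
--             rslt.append(lft[i])
--             i += 1
--         else:
--             rslt.append(rgt[j])
--             j += 1
--     rslt.extend(lft[i:])
--     rslt.extend(rgt[j:])
--     return rslt
--
-- def marathon(lgs, R):
--     tms = {}
--
--     for entry in lgs:
--         tm, prb, tm_time, rslt = entry
--         if rslt == 'C':
--             if tm not in tms:
--                 tms[tm] = {'solved': 0, 'penalty': 0, 'problems': {}}
--             if prb not in tms[tm]['problems']:
--                 tms[tm]['problems'][prb] = {'solved': False, 'incorrect': 0, 'time': 0}
--             if not tms[tm]['problems'][prb]['solved']:
--                 tms[tm]['problems'][prb]['solved'] = True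
--                 penalty = tm_time + 20 * tms[tm]['problems'][prb]['incorrect']
--                 tms[tm]['solved'] += 1
--                 tms[tm]['penalty'] += penalty
--                 tms[tm]['problems'][prb]['time'] = tm_time
--         elif rslt == 'I':
--             if tm not in tms:
--                 tms[tm] = {'solved': 0, 'penalty': 0, 'problems': {}}
--             if prb not in tms[tm]['problems']:
--                 tms[tm]['problems'][prb] = {'solved': False, 'incorrect': 0, 'time': 0}
--             if not tms[tm]['problems'][prb]['solved']:
--                 tms[tm]['problems'][prb]['incorrect'] += 1
--
--     tm_stats = []
--     for tm, stats in tms.items():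
--         if stats['solved'] > 0:
--             tm_stats.append((tm, stats['solved'], stats['penalty']))
--
--     return divide_teams(tm_stats)
-- ===== SOURCE B (Python) =====
-- def marathon(lgs, R):
--     tms = {}
--     for tm, prb, tm_time, rslt in lgs:
--         if rslt == 'C':
--             if tm not in tms:
--                 tms[tm] = {'solved': 0, 'penalty': 0, 'problems': {}}
--             if prb not in tms[tm]['problems']:
--                 tms[tm]['problems'][prb] = {'solved': False, 'incorrect': 0, 'time': 0}
--             if not tms[tm]['problems'][prb]['solved']:
--                 tms[tm]['problems'][prb]['solved'] = True
--                 tms[tm]['solved'] += 1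
--                 tms[tm]['penalty'] += tm_time + 20 * tms[tm]['problems'][prb]['incorrect']
--                 tms[tm]['problems'][prb]['time'] = tm_time
--         elif rslt == 'I':
--             if tm not in tms:
--                 tms[tm] = {'solved': 0, 'penalty': 0, 'problems': {}}
--             if prb not in tms[tm]['problems']:
--                 tms[tm]['problems'][prb] = {'solved': False, 'incorrect': 0, 'time': 0}
--             if not tms[tm]['problems'][prb]['solved']:
--                 tms[tm]['problems'][prb]['incorrect'] += 1
--     tm_stats = [(tm, st['solved'], st['penalty']) for tm, st in tms.items() if st['solved'] > 0]
--     return sorted(tm_stats, key=lambda t: (-t[1], t[2], t[0]))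
-- ===== Notes on version B (the rewrite author's own statement) =====
-- stated objective: simpler
-- what changed: A's hand-written recursive merge sort (divide_teams/merge with a three-level comparison) is replaced by one library sorted() call with the composite key (-solved, penalty, name), and the tm_stats accumulation loop by a list comprehension; the log-aggregation loop is unchanged.
import Mathlib
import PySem

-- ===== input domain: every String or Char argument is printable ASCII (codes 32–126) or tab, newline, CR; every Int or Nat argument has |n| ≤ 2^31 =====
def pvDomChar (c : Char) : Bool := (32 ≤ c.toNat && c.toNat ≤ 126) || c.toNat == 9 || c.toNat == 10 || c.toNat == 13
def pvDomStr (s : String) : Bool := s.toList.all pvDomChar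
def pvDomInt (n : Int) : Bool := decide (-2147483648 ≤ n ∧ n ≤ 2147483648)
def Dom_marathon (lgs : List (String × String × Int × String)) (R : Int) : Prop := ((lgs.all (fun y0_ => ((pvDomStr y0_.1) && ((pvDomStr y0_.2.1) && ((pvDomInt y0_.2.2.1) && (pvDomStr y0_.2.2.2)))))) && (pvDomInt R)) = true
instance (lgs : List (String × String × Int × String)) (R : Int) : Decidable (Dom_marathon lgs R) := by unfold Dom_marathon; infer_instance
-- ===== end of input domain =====

-- B replaces A's hand-written recursive merge sort by one library sort with the composite
-- key (-solved, penalty, name) and builds the stats list by a comprehension (objective: simpler).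

-- Shared helper: the log-aggregation loop, textually identical in Source A and Source B, so one
-- transliteration serves both ports. State: team ↦ (solved, penalty, problem ↦ (solved?, incorrect, time)).
def pvStep (tms : PySem.Dict String (Int × Int × PySem.Dict String (Bool × Int × Int)))
    (e : String × String × Int × String) :
    PySem.Dict String (Int × Int × PySem.Dict String (Bool × Int × Int)) :=
  let tm := e.1; let prb := e.2.1; let tm_time := e.2.2.1; let rslt := e.2.2.2
  if rslt == "C" then
    -- if tm not in tms: tms[tm] = {...}
    let tms1 := if tms.contains tm then tms else tms.insert tm (0, 0, PySem.Dict.empty)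
    let st := tms1.getD tm (0, 0, PySem.Dict.empty)
    -- if prb not in tms[tm]['problems']: ... = {...}   (in-place mutation modelled by write-back insert)
    let probs1 := if st.2.2.contains prb then st.2.2 else st.2.2.insert prb (false, 0, 0)
    let ps := probs1.getD prb (false, 0, 0)
    if ps.1 then
      tms1.insert tm (st.1, st.2.1, probs1)
    else
      let penalty := tm_time + 20 * ps.2.1
      tms1.insert tm (st.1 + 1, st.2.1 + penalty, probs1.insert prb (true, ps.2.1, tm_time))
  else if rslt == "I" then
    let tms1 := if tms.contains tm then tms else tms.insert tm (0, 0, PySem.Dict.empty)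
    let st := tms1.getD tm (0, 0, PySem.Dict.empty)
    let probs1 := if st.2.2.contains prb then st.2.2 else st.2.2.insert prb (false, 0, 0)
    let ps := probs1.getD prb (false, 0, 0)
    if ps.1 then
      tms1.insert tm (st.1, st.2.1, probs1)
    else
      tms1.insert tm (st.1, st.2.1, probs1.insert prb (false, ps.2.1 + 1, ps.2.2))
  else tms

def pvAgg (lgs : List (String × String × Int × String)) :
    PySem.Dict String (Int × Int × PySem.Dict String (Bool × Int × Int)) :=
  lgs.foldl pvStep PySem.Dict.empty

-- ===== PORT A =====
-- merge's while-loop comparison: lft[i][1] > rgt[j][1] or ... (three-level tie-break)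
def pvCond (a b : String × Int × Int) : Bool :=
  decide (b.2.1 < a.2.1) || (a.2.1 == b.2.1 && decide (a.2.2 < b.2.2))
    || (a.2.1 == b.2.1 && a.2.2 == b.2.2 && decide (a.1 < b.1))

def pvMerge : List (String × Int × Int) → List (String × Int × Int) → List (String × Int × Int)
  | [], r => r
  | x :: xs, [] => x :: xs
  | x :: xs, y :: ys =>
    if pvCond x y then x :: pvMerge xs (y :: ys) else y :: pvMerge (x :: xs) ys

theorem pvDivide_md (n : Nat) (h : ¬ n ≤ 1) :
    0 ≤ PySem.Int.floordiv (n : Int) 2 ∧ 1 ≤ (PySem.Int.floordiv (n : Int) 2).toNat ∧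
      (PySem.Int.floordiv (n : Int) 2).toNat < n := by
  have h2 : (0:Int) < 2 := by norm_num
  have := (PySem.Int.floordiv_eq_iff_of_pos (a := (n : Int)) (b := 2) h2
    (q := PySem.Int.floordiv (n : Int) 2)).mp rfl
  omega

def pvDivide (tms : List (String × Int × Int)) : List (String × Int × Int) :=
  if tms.length ≤ 1 then tms
  else
    -- md = len(tms) // 2 ; tms[:md], tms[md:]
    let md : Int := PySem.Int.floordiv tms.length 2
    pvMerge (pvDivide (PySem.List.slice tms none (some md))) (pvDivide (PySem.List.slice tms (some md) none))
termination_by tms.length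
decreasing_by
  · obtain ⟨h0, h1, h2⟩ := pvDivide_md tms.length (by assumption)
    rw [PySem.List.slice_to tms h0]
    simp only [List.length_take]
    omega
  · obtain ⟨h0, h1, h2⟩ := pvDivide_md tms.length (by assumption)
    rw [PySem.List.slice_from tms h0]
    simp only [List.length_drop]
    omega

-- tm_stats accumulation loop of Source A
def pvStatsA (tms : PySem.Dict String (Int × Int × PySem.Dict String (Bool × Int × Int))) :
    List (String × Int × Int) :=
  tms.items.foldl (fun acc p => if decide (0 < p.2.1) then acc ++ [(p.1, p.2.1, p.2.2.1)] else acc) []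

def marathon (lgs : List (String × String × Int × String)) (R : Int) : List (String × Int × Int) :=
  pvDivide (pvStatsA (pvAgg lgs))

-- ===== PORT B =====
-- the comprehension [(tm, st['solved'], st['penalty']) for tm, st in tms.items() if st['solved'] > 0]
def pvStatsB (tms : PySem.Dict String (Int × Int × PySem.Dict String (Bool × Int × Int))) :
    List (String × Int × Int) :=
  (tms.items.filter (fun p => decide (0 < p.2.1))).map (fun p => (p.1, p.2.1, p.2.2.1))

-- sorted(xs, key=lambda t: (-t[1], t[2], t[0])): PySem owns sorted with 1- and 2-component keys;
-- the 3-component key is ported by hand in exactly PySem.List.sorted's stable-insertion model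
-- (exact: CPython's sort is stable, and a stable sort under a fixed key order is unique).
def pvLt3 (a b : String × Int × Int) : Bool :=
  decide (-a.2.1 < -b.2.1)
    || (!decide (-b.2.1 < -a.2.1)
        && (decide (a.2.2 < b.2.2) || (!decide (b.2.2 < a.2.2) && decide (a.1 < b.1))))

def pvSorted3 (xs : List (String × Int × Int)) : List (String × Int × Int) :=
  xs.foldl (fun acc x => PySem.List.insertBy pvLt3 x acc) []

def marathon_alt (lgs : List (String × String × Int × String)) (R : Int) : List (String × Int × Int) :=
  pvSorted3 (pvStatsB (pvAgg lgs))

-- ===== PRECONDITION & SPEC =====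
def Spec_marathon (lgs : List (String × String × Int × String)) (R : Int) (out : List (String × Int × Int)) : Prop := out = marathon_alt lgs R
instance (lgs : List (String × String × Int × String)) (R : Int) (out : List (String × Int × Int)) : Decidable (Spec_marathon lgs R out) := by unfold Spec_marathon; infer_instance

-- ===== CLAIM (what is proved, stated in full; the proofs are below) =====
def Claim_equal_marathon : Prop := ∀ (lgs : List (String × String × Int × String)) (R : Int), Dom_marathon lgs R → Spec_marathon lgs R (marathon lgs R)

-- ===== LEMMAS AND PROOFS =====

-- The ranking order both sorts realise: solved descending, then penalty ascending, then name ascending.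
def pvFull (a b : String × Int × Int) : Prop :=
  b.2.1 < a.2.1 ∨ (a.2.1 = b.2.1 ∧ (a.2.2 < b.2.2 ∨ (a.2.2 = b.2.2 ∧ a.1 < b.1)))

theorem pvCond_iff (a b : String × Int × Int) : pvCond a b = true ↔ pvFull a b := by
  simp only [pvCond, pvFull, Bool.or_eq_true, Bool.and_eq_true, decide_eq_true_eq, beq_iff_eq]
  tauto

theorem pvLt3_iff (a b : String × Int × Int) : pvLt3 a b = true ↔ pvFull a b := by
  simp only [pvLt3, pvFull, Bool.or_eq_true, Bool.and_eq_true, Bool.not_eq_true',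
    decide_eq_true_eq, decide_eq_false_iff_not, neg_lt_neg_iff]
  constructor
  · rintro (h | ⟨h1, h2⟩)
    · exact Or.inl h
    · by_cases hba : b.2.1 < a.2.1
      · exact Or.inl hba
      · refine Or.inr ⟨by omega, ?_⟩
        rcases h2 with h | ⟨h3, h4⟩
        · exact Or.inl h
        · by_cases hpp : a.2.2 < b.2.2
          · exact Or.inl hpp
          · exact Or.inr ⟨by omega, h4⟩
  · rintro (h | ⟨h1, h2⟩)
    · exact Or.inl h
    · refine Or.inr ⟨by omega, ?_⟩
      rcases h2 with h | ⟨h3, h4⟩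
      · exact Or.inl h
      · exact Or.inr ⟨by omega, h4⟩

theorem pvFull_trans {a b c : String × Int × Int} (h1 : pvFull a b) (h2 : pvFull b c) : pvFull a c := by
  rcases h1 with h | ⟨e1, h⟩ <;> rcases h2 with g | ⟨e2, g⟩
  · exact Or.inl (by omega)
  · exact Or.inl (by omega)
  · exact Or.inl (by omega)
  · refine Or.inr ⟨by omega, ?_⟩
    rcases h with hp | ⟨ep, hn⟩ <;> rcases g with gp | ⟨gp2, gn⟩
    · exact Or.inl (by omega)
    · exact Or.inl (by omega)
    · exact Or.inl (by omega)
    · exact Or.inr ⟨by omega, lt_trans hn gn⟩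

theorem pvFull_asymm {a b : String × Int × Int} (h1 : pvFull a b) (h2 : pvFull b a) : False := by
  rcases h1 with h | ⟨e1, h⟩ <;> rcases h2 with g | ⟨e2, g⟩ <;> try omega
  rcases h with hp | ⟨ep, hn⟩ <;> rcases g with gp | ⟨gp2, gn⟩ <;> try omega
  exact absurd gn (not_lt.mpr (le_of_lt hn))

theorem pvFull_total {a b : String × Int × Int} (hne : a.1 ≠ b.1) (h : ¬ pvFull a b) : pvFull b a := by
  rcases lt_trichotomy a.2.1 b.2.1 with hs | hs | hs
  · exact Or.inl hs
  · rcases lt_trichotomy a.2.2 b.2.2 with hp | hp | hp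
    · exact absurd (Or.inr ⟨hs, Or.inl hp⟩) h
    · rcases lt_trichotomy a.1 b.1 with hn | hn | hn
      · exact absurd (Or.inr ⟨hs, Or.inr ⟨hp, hn⟩⟩) h
      · exact absurd hn hne
      · exact Or.inr ⟨hs.symm, Or.inr ⟨hp.symm, hn⟩⟩
    · exact Or.inr ⟨hs.symm, Or.inl hp⟩
  · exact absurd (Or.inl hs) h

theorem pvMerge_perm (l r : List (String × Int × Int)) : (pvMerge l r).Perm (l ++ r) := by
  fun_induction pvMerge l r with
  | case1 r => simp
  | case2 x xs => simp
  | case3 x xs y ys hc ih => exact ih.cons x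
  | case4 x xs y ys hc ih => exact (ih.cons y).trans List.perm_middle.symm

theorem pvMerge_pairwise (l r : List (String × Int × Int))
    (hl : l.Pairwise pvFull) (hr : r.Pairwise pvFull)
    (hx : ∀ a ∈ l, ∀ b ∈ r, a.1 ≠ b.1) : (pvMerge l r).Pairwise pvFull := by
  revert hl hr hx
  fun_induction pvMerge l r with
  | case1 r => intro _ hr _; exact hr
  | case2 x xs => intro hl _ _; exact hl
  | case3 x xs y ys hc ih =>
    intro hl hr hx
    rw [List.pairwise_cons] at hl
    have hxy : pvFull x y := (pvCond_iff x y).mp hc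
    refine List.pairwise_cons.mpr ⟨?_, ih hl.2 hr (fun a ha b hb => hx a (List.mem_cons_of_mem x ha) b hb)⟩
    intro z hz
    rcases List.mem_append.mp ((pvMerge_perm xs (y :: ys)).mem_iff.mp hz) with h | h
    · exact hl.1 z h
    · rcases List.mem_cons.mp h with rfl | h
      · exact hxy
      · exact pvFull_trans hxy ((List.pairwise_cons.mp hr).1 z h)
  | case4 x xs y ys hc ih =>
    intro hl hr hx
    rw [List.pairwise_cons] at hl hr
    have hyx : pvFull y x := by
      refine pvFull_total (hx x List.mem_cons_self y List.mem_cons_self) ?_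
      intro hf
      exact absurd ((pvCond_iff x y).mpr hf) (by simp [hc])
    refine List.pairwise_cons.mpr ⟨?_, ih (List.pairwise_cons.mpr hl) hr.2
      (fun a ha b hb => hx a ha b (List.mem_cons_of_mem y hb))⟩
    intro z hz
    rcases List.mem_append.mp ((pvMerge_perm (x :: xs) ys).mem_iff.mp hz) with h | h
    · rcases List.mem_cons.mp h with rfl | h
      · exact hyx
      · exact pvFull_trans hyx (hl.1 z h)
    · exact hr.1 z h

theorem pvDivide_perm (tms : List (String × Int × Int)) : (pvDivide tms).Perm tms := by
  fun_induction pvDivide tms with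
  | case1 tms h => exact List.Perm.refl tms
  | case2 tms h md ih1 ih2 =>
    obtain ⟨h0, h1, h2⟩ := pvDivide_md tms.length h
    refine (pvMerge_perm _ _).trans ((ih1.append ih2).trans ?_)
    rw [PySem.List.slice_to tms h0, PySem.List.slice_from tms h0, List.take_append_drop]

theorem pvDivide_pairwise (tms : List (String × Int × Int))
    (h : tms.Pairwise (fun a b => a.1 ≠ b.1)) : (pvDivide tms).Pairwise pvFull := by
  revert h
  fun_induction pvDivide tms with
  | case1 tms h =>
    intro _
    match tms, h with
    | [], _ => exact List.Pairwise.nil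
    | [a], _ => simp
  | case2 tms h md ih1 ih2 =>
    intro hne
    obtain ⟨h0, h1, h2⟩ := pvDivide_md tms.length h
    rw [PySem.List.slice_to tms h0] at *
    rw [PySem.List.slice_from tms h0] at *
    have hsplit : tms = List.take (PySem.Int.floordiv (↑tms.length) 2).toNat tms ++
        List.drop (PySem.Int.floordiv (↑tms.length) 2).toNat tms := (List.take_append_drop _ tms).symm
    rw [hsplit] at hne
    obtain ⟨hta, htd, hcross⟩ := List.pairwise_append.mp hne
    refine pvMerge_pairwise _ _ (ih1 hta) (ih2 htd) ?_
    intro a ha b hb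
    exact hcross a ((pvDivide_perm _).mem_iff.mp ha) b ((pvDivide_perm _).mem_iff.mp hb)

theorem pvSorted3_perm (xs : List (String × Int × Int)) : (pvSorted3 xs).Perm xs := by
  simpa using PySem.List.foldl_insertBy_perm pvLt3 xs []

theorem pvInsertBy_pairwise (x : String × Int × Int) (acc : List (String × Int × Int))
    (h : acc.Pairwise pvFull) (hn : ∀ z ∈ acc, z.1 ≠ x.1) :
    (PySem.List.insertBy pvLt3 x acc).Pairwise pvFull := by
  induction acc with
  | nil => simp [PySem.List.insertBy]
  | cons y ys ih =>
    rw [List.pairwise_cons] at h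
    by_cases hxy : pvLt3 x y = true
    · have hfxy : pvFull x y := (pvLt3_iff x y).mp hxy
      simp only [PySem.List.insertBy, hxy, if_true]
      refine List.pairwise_cons.mpr ⟨?_, List.pairwise_cons.mpr h⟩
      intro z hz
      rcases List.mem_cons.mp hz with rfl | hz
      · exact hfxy
      · exact pvFull_trans hfxy (h.1 z hz)
    · have hfyx : pvFull y x :=
        pvFull_total (hn y List.mem_cons_self).symm (fun g => hxy ((pvLt3_iff x y).mpr g))
      simp only [PySem.List.insertBy, hxy]
      refine List.pairwise_cons.mpr ⟨?_, ih h.2 (fun z hz => hn z (List.mem_cons_of_mem y hz))⟩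
      intro z hz
      rcases (PySem.List.mem_insertBy pvLt3 x z ys).mp hz with rfl | hz
      · exact hfyx
      · exact h.1 z hz

theorem pvSorted3_pairwise_aux (xs acc : List (String × Int × Int))
    (hxs : xs.Pairwise (fun a b => a.1 ≠ b.1)) (hacc : acc.Pairwise pvFull)
    (hcross : ∀ z ∈ acc, ∀ x ∈ xs, z.1 ≠ x.1) :
    (xs.foldl (fun acc x => PySem.List.insertBy pvLt3 x acc) acc).Pairwise pvFull := by
  induction xs generalizing acc with
  | nil => exact hacc
  | cons x xs ih =>
    rw [List.pairwise_cons] at hxs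
    refine ih _ hxs.2 (pvInsertBy_pairwise x acc hacc
      (fun z hz => hcross z hz x List.mem_cons_self)) ?_
    intro z hz x' hx'
    rcases (PySem.List.mem_insertBy pvLt3 x z acc).mp hz with rfl | hz
    · exact hxs.1 x' hx'
    · exact hcross z hz x' (List.mem_cons_of_mem x hx')

theorem pvStep_nodup (d : PySem.Dict String (Int × Int × PySem.Dict String (Bool × Int × Int)))
    (e : String × String × Int × String) (h : d.keys.Nodup) : (pvStep d e).keys.Nodup := by
  unfold pvStep
  dsimp only
  split_ifs <;>
    first
      | assumption
      | (apply PySem.Dict.nodup_keys_insert; assumption)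
      | (apply PySem.Dict.nodup_keys_insert; apply PySem.Dict.nodup_keys_insert; assumption)

theorem pvAgg_nodup (lgs : List (String × String × Int × String)) : (pvAgg lgs).keys.Nodup := by
  unfold pvAgg
  generalize hd : (PySem.Dict.empty : PySem.Dict String (Int × Int × PySem.Dict String (Bool × Int × Int))) = d
  have hnd : d.keys.Nodup := by rw [← hd]; exact PySem.Dict.nodup_keys_empty
  clear hd
  induction lgs generalizing d with
  | nil => exact hnd
  | cons e rest ih => exact ih _ (pvStep_nodup d e hnd)

theorem pvStats_eq (tms : PySem.Dict String (Int × Int × PySem.Dict String (Bool × Int × Int))) :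
    pvStatsA tms = pvStatsB tms := by
  unfold pvStatsA pvStatsB
  simpa using PySem.List.foldl_append_if (fun p => decide (0 < p.2.1))
    (fun p => (p.1, p.2.1, p.2.2.1)) tms.items []

theorem pvStatsB_pairwise_ne (tms : PySem.Dict String (Int × Int × PySem.Dict String (Bool × Int × Int)))
    (h : tms.keys.Nodup) : (pvStatsB tms).Pairwise (fun a b => a.1 ≠ b.1) := by
  unfold pvStatsB
  simp only [PySem.Dict.keys, List.Nodup] at h
  have hitems : tms.items.Pairwise (fun p q => p.1 ≠ q.1) := List.pairwise_map.mp h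
  exact List.pairwise_map.mpr (hitems.filter _)

-- ===== VERDICT (by name: the statement is the Claim_ definition above) =====
theorem marathon_spec : Claim_equal_marathon := by
  intro lgs R _
  unfold Spec_marathon marathon marathon_alt
  rw [pvStats_eq]
  have hne := pvStatsB_pairwise_ne (pvAgg lgs) (pvAgg_nodup lgs)
  have w1 := pvDivide_pairwise _ hne
  have w2 := pvSorted3_pairwise_aux (pvStatsB (pvAgg lgs)) [] hne List.Pairwise.nil (by simp)
  have hp : (pvDivide (pvStatsB (pvAgg lgs))).Perm (pvSorted3 (pvStatsB (pvAgg lgs))) :=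
    (pvDivide_perm _).trans (pvSorted3_perm _).symm
  exact List.Perm.eq_of_pairwise (fun a b _ _ hab hba => (pvFull_asymm hab hba).elim) w1 w2 hp
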